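-- pv_equiv track=rewrite | github.com/Luyzr/EE6222_A1_O2 | main.py | Two_steps
-- ===== SOURCE A (Python) =====
-- def neighbours(x, y, image):
--     '''Return 8-neighbours of point p1 of picture, in order'''
--     i = image
--     x1, y1, x_1, y_1 = x + 1, y - 1, x - 1, y + 1
--     # print ((x,y))
--     return [i[y1][x], i[y1][x1], i[y][x1], i[y_1][x1],  # P2,P3,P4,P5
--             i[y_1][x], i[y_1][x_1], i[y][x_1], i[y1][x_1]]  # P6,P7,P8,P9
--
-- def transitions(neighbours):
--     n = neighbours + neighbours[0:1]  # n = P2, ... P9, P2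
--     return sum((n1, n2) == (0, 1) for n1, n2 in zip(n, n[1:])) # zip(n, n[1:]) = [(P2, P3), (P3, P4), ... (P9, P2)]
--
-- def Two_steps(image):
--     step1 = step2 = [(-1, -1)]
--     # Repeat the steps until there is no more changing
--     while step1 or step2:
--         # Step 1  label all points fitting all the conditions
--         step1 = []
--         for y in range(1, len(image) - 1):
--             for x in range(1, len(image[0]) - 1):
--                 P2, P3, P4, P5, P6, P7, P8, P9 = n = neighbours(x, y, image)
--                 if (image[y][x] == 1 and  # (Condition 0)
--                         P4 * P6 * P8 == 0 and  # Condition 4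
--                         P2 * P4 * P6 == 0 and  # Condition 3
--                         transitions(n) == 1 and  # Condition 2
--                         2 <= sum(n) <= 6):  # Condition 1
--                     step1.append((x, y))
--         # Delete all points in step1
--         for x, y in step1: image[y][x] = 0
--         # Step 2 label all points fitting all the conditions
--         step2 = []
--         for y in range(1, len(image) - 1):
--             for x in range(1, len(image[0]) - 1):
--                 P2, P3, P4, P5, P6, P7, P8, P9 = n = neighbours(x, y, image)
--                 if (image[y][x] == 1 and  # (Condition 0)
--                         P2 * P6 * P8 == 0 and  # Condition 4
--                         P2 * P4 * P8 == 0 and  # Condition 3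
--                         transitions(n) == 1 and  # Condition 2
--                         2 <= sum(n) <= 6):  # Condition 1
--                     step2.append((x, y))
--         # Delete all points in step2
--         for x, y in step2: image[y][x] = 0
--     return image
-- ===== SOURCE B (Python) =====
-- # B: worklist thinning — the first pass scans the whole grid, every later sub-pass re-checks
-- # only the (clipped) 3x3 neighbourhoods of recently deleted pixels instead of rescanning the
-- # grid. Like A, B mutates the image in place and returns it.
-- def Two_steps(image):
--     h = len(image)
--     w = len(image[0]) if image else 0
--
--     def cond(x, y, first):
--         if image[y][x] != 1:
--             return False
--         P2 = image[y - 1][x]; P3 = image[y - 1][x + 1]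
--         P4 = image[y][x + 1]; P5 = image[y + 1][x + 1]
--         P6 = image[y + 1][x]; P7 = image[y + 1][x - 1]
--         P8 = image[y][x - 1]; P9 = image[y - 1][x - 1]
--         if first:
--             if P4 * P6 * P8 != 0 or P2 * P4 * P6 != 0:
--                 return False
--         else:
--             if P2 * P6 * P8 != 0 or P2 * P4 * P8 != 0:
--                 return False
--         ring = [P2, P3, P4, P5, P6, P7, P8, P9, P2]
--         if sum(1 for a, b in zip(ring, ring[1:]) if a == 0 and b == 1) != 1:
--             return False
--         return 2 <= P2 + P3 + P4 + P5 + P6 + P7 + P8 + P9 <= 6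
--
--     def nbhd(pts):
--         return {(x + dx, y + dy) for (x, y) in pts
--                 for dx in (-1, 0, 1) for dy in (-1, 0, 1)
--                 if 1 <= x + dx < w - 1 and 1 <= y + dy < h - 1}
--
--     cand1 = cand2 = None  # None = first pass: scan the whole interior
--     while True:
--         if cand1 is None:
--             d1 = {(x, y) for y in range(1, h - 1) for x in range(1, w - 1) if cond(x, y, True)}
--         else:
--             d1 = {p for p in cand1 if cond(p[0], p[1], True)}
--         for (x, y) in d1:
--             image[y][x] = 0
--         n1 = nbhd(d1)
--         if cand2 is None:
--             d2 = {(x, y) for y in range(1, h - 1) for x in range(1, w - 1) if cond(x, y, False)}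
--         else:
--             d2 = {p for p in cand2 | n1 if cond(p[0], p[1], False)}
--         for (x, y) in d2:
--             image[y][x] = 0
--         n2 = nbhd(d2)
--         cand1 = n1 | n2
--         cand2 = n2
--         if not d1 and not d2:
--             return image
-- ===== Notes on version B (the rewrite author's own statement) =====
-- stated objective: faster
-- what changed: A rescans every interior pixel of the whole grid in both sub-passes of every iteration; B scans the grid once and afterwards keeps worklists, re-checking only the clipped 3x3 neighbourhoods of recently deleted pixels (correct because a pixel's thinning condition depends only on its 3x3 neighbourhood), and B's per-pixel test early-exits on non-1 pixels where A always builds the full neighbour list.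
import Mathlib
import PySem

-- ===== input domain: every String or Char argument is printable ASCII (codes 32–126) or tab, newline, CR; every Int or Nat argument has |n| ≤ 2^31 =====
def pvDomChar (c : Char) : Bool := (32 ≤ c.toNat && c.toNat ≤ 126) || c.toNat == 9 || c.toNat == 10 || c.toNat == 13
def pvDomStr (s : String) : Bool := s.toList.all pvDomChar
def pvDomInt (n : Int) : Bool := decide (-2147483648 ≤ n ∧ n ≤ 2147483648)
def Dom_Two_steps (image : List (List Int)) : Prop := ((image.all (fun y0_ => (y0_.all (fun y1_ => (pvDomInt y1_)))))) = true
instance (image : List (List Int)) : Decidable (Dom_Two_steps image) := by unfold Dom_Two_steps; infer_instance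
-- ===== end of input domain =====

-- B replaces A's full rescan of the whole grid in every pass by a worklist: after the first
-- scan each sub-pass re-checks only the 3x3 neighbourhoods of recently deleted pixels
-- (objective: faster). Both A and B mutate the image in place; the equivalence proved here
-- is about the RETURN value.

-- ===== PORT A =====
-- image[y][x]: out-of-range indices (Python IndexError) are excluded by Pre_; the .getD defaults are unreachable there.
def pvCell (i : List (List Int)) (y x : Int) : Int :=
  PySem.List.pyGetD (PySem.List.pyGetD i y []) x 0

def pvNeighbours (x y : Int) (image : List (List Int)) : List Int :=
  let i := image
  let x1 := x + 1; let y1 := y - 1; let x_1 := x - 1; let y_1 := y + 1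
  [pvCell i y1 x, pvCell i y1 x1, pvCell i y x1, pvCell i y_1 x1,
   pvCell i y_1 x, pvCell i y_1 x_1, pvCell i y x_1, pvCell i y1 x_1]

def pvTransitions (neighbours : List Int) : Int :=
  let n := neighbours ++ PySem.List.slice neighbours (some 0) (some 1)
  ((n.zip n.tail).countP (fun p => p.1 == 0 && p.2 == 1) : Nat)

def pvStep1 (image : List (List Int)) : List (Int × Int) :=
  (PySem.List.pyRange 1 ((image.length : Int) - 1)).foldl (fun step1 y =>
    (PySem.List.pyRange 1 (((PySem.List.pyGetD image 0 []).length : Int) - 1)).foldl (fun step1 x =>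
      let n := pvNeighbours x y image
      match n with
      | [P2, _P3, P4, _P5, P6, _P7, P8, _P9] =>
        if pvCell image y x == 1 &&
           P4 * P6 * P8 == 0 &&
           P2 * P4 * P6 == 0 &&
           pvTransitions n == 1 &&
           (decide (2 ≤ n.sum) && decide (n.sum ≤ 6))
        then step1 ++ [(x, y)] else step1
      | _ => step1) step1) []

def pvStep2 (image : List (List Int)) : List (Int × Int) :=
  (PySem.List.pyRange 1 ((image.length : Int) - 1)).foldl (fun step2 y =>
    (PySem.List.pyRange 1 (((PySem.List.pyGetD image 0 []).length : Int) - 1)).foldl (fun step2 x =>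
      let n := pvNeighbours x y image
      match n with
      | [P2, _P3, P4, _P5, P6, _P7, P8, _P9] =>
        if pvCell image y x == 1 &&
           P2 * P6 * P8 == 0 &&
           P2 * P4 * P8 == 0 &&
           pvTransitions n == 1 &&
           (decide (2 ≤ n.sum) && decide (n.sum ≤ 6))
        then step2 ++ [(x, y)] else step2
      | _ => step2) step2) []

-- for x, y in step: image[y][x] = 0
def pvDeleteAll (ps : List (Int × Int)) (image : List (List Int)) : List (List Int) :=
  ps.foldl (fun img p =>
    PySem.List.pySetD img p.2 (PySem.List.pySetD (PySem.List.pyGetD img p.2 []) p.1 0)) image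

-- fuel bound for the while-loops: every iteration that continues deletes at least one 1-cell,
-- so (number of 1-cells) + 1 iterations always suffice (a totality guard only).
def pvOnes (g : List (List Int)) : Nat := (g.map (fun r => r.count 1)).sum

def pvLoopA : Nat → List (List Int) → List (List Int)
  | 0, image => image
  | fuel + 1, image =>
    let step1 := pvStep1 image
    let image1 := pvDeleteAll step1 image
    let step2 := pvStep2 image1
    let image2 := pvDeleteAll step2 image1
    if step1 = [] ∧ step2 = [] then image2 else pvLoopA fuel image2

def Two_steps (image : List (List Int)) : List (List Int) :=
  pvLoopA (pvOnes image + 1) image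

-- ===== PORT B =====
-- Source B's cond(x, y, first), an early-return chain
def pvCondB (image : List (List Int)) (x y : Int) (first : Bool) : Bool :=
  if pvCell image y x ≠ 1 then false
  else
    let P2 := pvCell image (y-1) x
    let P3 := pvCell image (y-1) (x+1)
    let P4 := pvCell image y (x+1)
    let P5 := pvCell image (y+1) (x+1)
    let P6 := pvCell image (y+1) x
    let P7 := pvCell image (y+1) (x-1)
    let P8 := pvCell image y (x-1)
    let P9 := pvCell image (y-1) (x-1)
    if (if first then !(P4 * P6 * P8 == 0) || !(P2 * P4 * P6 == 0)
        else !(P2 * P6 * P8 == 0) || !(P2 * P4 * P8 == 0)) then false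
    else
      let ring := [P2, P3, P4, P5, P6, P7, P8, P9, P2]
      if ((((ring.zip ring.tail).countP (fun p => p.1 == 0 && p.2 == 1) : Nat) : Int)) ≠ 1 then false
      else decide (2 ≤ P2 + P3 + P4 + P5 + P6 + P7 + P8 + P9) &&
           decide (P2 + P3 + P4 + P5 + P6 + P7 + P8 + P9 ≤ 6)

-- Source B's nbhd(pts): the 3x3 neighbourhoods of a set of pixels, clipped to the interior
def pvNbhdC (h w : Int) (pts : List (Int × Int)) : PySem.Set (Int × Int) :=
  PySem.Set.ofList (pts.flatMap (fun p =>
    ([(-1 : Int), 0, 1]).flatMap (fun dx =>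
      (([(-1 : Int), 0, 1]).filter (fun dy =>
        decide (1 ≤ p.1 + dx) && decide (p.1 + dx < w - 1) &&
        decide (1 ≤ p.2 + dy) && decide (p.2 + dy < h - 1))).map
        (fun dy => (p.1 + dx, p.2 + dy)))))

-- the first-pass full scan {(x, y) for y in range(1, h-1) for x in range(1, w-1) if cond(x, y, first)}
def pvScan (g : List (List Int)) (h w : Int) (first : Bool) : PySem.Set (Int × Int) :=
  PySem.Set.ofList ((PySem.List.pyRange 1 (h - 1)).flatMap (fun y =>
    ((PySem.List.pyRange 1 (w - 1)).filter (fun x => pvCondB g x y first)).map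
      (fun x => (x, y))))

-- the while-loop; None = first pass (scan the whole interior), Some c = worklist pass
def pvLoopB (h w : Int) :
    Nat → List (List Int) → Option (PySem.Set (Int × Int)) → Option (PySem.Set (Int × Int)) →
      List (List Int)
  | 0, image, _, _ => image
  | fuel + 1, image, cand1, cand2 =>
    let d1 := match cand1 with
      | none => pvScan image h w true
      | some c => c.filter (fun p => pvCondB image p.1 p.2 true)
    let image1 := pvDeleteAll d1 image
    let n1 := pvNbhdC h w d1
    let d2 := match cand2 with
      | none => pvScan image1 h w false
      | some c => (PySem.Set.union c n1).filter (fun p => pvCondB image1 p.1 p.2 false)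
    let image2 := pvDeleteAll d2 image1
    let n2 := pvNbhdC h w d2
    if d1 = [] ∧ d2 = [] then image2
    else pvLoopB h w fuel image2 (some (PySem.Set.union n1 n2)) (some n2)

def Two_steps_alt (image : List (List Int)) : List (List Int) :=
  let h : Int := image.length
  let w : Int := if image = [] then 0 else ((image.headD []).length : Int)
  pvLoopB h w (pvOnes image + 1) image none none

-- ===== PRECONDITION & SPEC =====
-- Pre_ excludes exactly the inputs on which A (and B) raise IndexError: a grid whose interior is
-- scanned (at least 3 rows and a first row of length ≥ 3) but with some row shorter than the first row.
def Pre_Two_steps (image : List (List Int)) : Prop :=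
  3 ≤ image.length → 3 ≤ (image.headD []).length →
    ∀ row ∈ image, (image.headD []).length ≤ row.length

instance (image : List (List Int)) : Decidable (Pre_Two_steps image) := by
  unfold Pre_Two_steps; infer_instance

def pvWitness_Two_steps : List (List Int) := [[0, 0, 0], [0, 1, 0], [0, 0, 0]]

def Spec_Two_steps (image : List (List Int)) (out : List (List Int)) : Prop := out = Two_steps_alt image
instance (image : List (List Int)) (out : List (List Int)) : Decidable (Spec_Two_steps image out) := by unfold Spec_Two_steps; infer_instance

-- ===== CLAIM (what is proved, stated in full; the proofs are below) =====
def Claim_equal_Two_steps : Prop := ∀ (image : List (List Int)), Dom_Two_steps image → Pre_Two_steps image → Spec_Two_steps image (Two_steps image)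

-- ===== LEMMAS AND PROOFS =====

-- the cell at Nat coordinates (row yy, column xx), as an Option
def pvCellN (g : List (List Int)) (yy xx : Nat) : Option Int := g[yy]?.bind (fun r => r[xx]?)

-- the shared pass condition (region test excluded), in the normal form A's scan reduces to,
-- abstracted over the values of the centre cell and its 8 neighbours
def pvCondOf (first : Bool) (v c2 c3 c4 c5 c6 c7 c8 c9 : Int) : Bool :=
  v == 1 &&
  (if first then c4 * c6 * c8 == 0 else c2 * c6 * c8 == 0) &&
  (if first then c2 * c4 * c6 == 0 else c2 * c4 * c8 == 0) &&
  pvTransitions [c2, c3, c4, c5, c6, c7, c8, c9] == 1 &&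
  (decide (2 ≤ ([c2, c3, c4, c5, c6, c7, c8, c9] : List Int).sum) &&
   decide (([c2, c3, c4, c5, c6, c7, c8, c9] : List Int).sum ≤ 6))

def pvCond (g : List (List Int)) (first : Bool) (x y : Int) : Bool :=
  pvCondOf first (pvCell g y x) (pvCell g (y-1) x) (pvCell g (y-1) (x+1)) (pvCell g y (x+1))
    (pvCell g (y+1) (x+1)) (pvCell g (y+1) x) (pvCell g (y+1) (x-1)) (pvCell g y (x-1))
    (pvCell g (y-1) (x-1))

-- interior-region predicate (1 ≤ x < w-1, 1 ≤ y < h-1)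
def pvIn (h w : Int) (p : Int × Int) : Prop :=
  1 ≤ p.1 ∧ p.1 < w - 1 ∧ 1 ≤ p.2 ∧ p.2 < h - 1

def pvW (g : List (List Int)) : Int := ((PySem.List.pyGetD g 0 []).length : Int)

theorem pvStep_eq (g : List (List Int)) (first : Bool) :
    (if first then pvStep1 g else pvStep2 g) =
      (PySem.List.pyRange 1 ((g.length : Int) - 1)).flatMap (fun y =>
        ((PySem.List.pyRange 1 (pvW g - 1)).filter (fun x => pvCond g first x y)).map
          (fun x => (x, y))) := by
  have key : ∀ (c : Int → Int → Bool) (L : List Int) (W : Int),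
      L.foldl (fun acc y => (PySem.List.pyRange 1 W).foldl
          (fun acc x => if c x y then acc ++ [(x, y)] else acc) acc) ([] : List (Int × Int))
        = L.flatMap (fun y => ((PySem.List.pyRange 1 W).filter (fun x => c x y)).map
          (fun x => (x, y))) := by
    intro c L W
    have h1 : (fun (acc : List (Int × Int)) (y : Int) =>
        (PySem.List.pyRange 1 W).foldl (fun acc x => if c x y then acc ++ [(x, y)] else acc) acc)
        = fun acc y => acc ++ ((PySem.List.pyRange 1 W).filter (fun x => c x y)).map
          (fun x => (x, y)) := by
      funext acc y
      exact PySem.List.foldl_append_if (fun x => c x y) (fun x => (x, y)) _ acc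
    rw [h1, PySem.List.foldl_append_eq_flatMap, List.nil_append]
  cases first
  · exact key (fun x y => pvCond g false x y) _ _
  · exact key (fun x y => pvCond g true x y) _ _

theorem mem_pvStep (g : List (List Int)) (first : Bool) (x y : Int) :
    (x, y) ∈ (if first then pvStep1 g else pvStep2 g) ↔
      (pvIn (g.length : Int) (pvW g) (x, y) ∧ pvCond g first x y = true) := by
  rw [pvStep_eq]
  simp only [List.mem_flatMap, List.mem_filter, List.mem_map, PySem.List.mem_pyRange_one,
    Prod.mk.injEq, pvIn]
  constructor
  · rintro ⟨b, ⟨hb1, hb2⟩, a, ⟨⟨ha1, ha2⟩, hc⟩, h1, h2⟩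
    subst h1; subst h2; exact ⟨⟨ha1, ha2, hb1, hb2⟩, hc⟩
  · rintro ⟨⟨h3, h4, h1, h2⟩, h5⟩
    exact ⟨y, ⟨h1, h2⟩, x, ⟨⟨h3, h4⟩, h5⟩, rfl, rfl⟩

theorem mem_step1 (g : List (List Int)) (x y : Int) :
    (x, y) ∈ pvStep1 g ↔ (pvIn (g.length : Int) (pvW g) (x, y) ∧ pvCond g true x y = true) := by
  simpa using mem_pvStep g true x y

theorem mem_step2 (g : List (List Int)) (x y : Int) :
    (x, y) ∈ pvStep2 g ↔ (pvIn (g.length : Int) (pvW g) (x, y) ∧ pvCond g false x y = true) := by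
  simpa using mem_pvStep g false x y

theorem cell_set0 (g : List (List Int)) (x y : Int) (hx : 0 ≤ x) (hy : 0 ≤ y) (yy xx : Nat) :
    pvCellN (PySem.List.pySetD g y (PySem.List.pySetD (PySem.List.pyGetD g y []) x 0)) yy xx
      = if (xx : Int) = x ∧ (yy : Int) = y then (pvCellN g yy xx).map (fun _ => 0)
        else pvCellN g yy xx := by
  rw [PySem.List.pySetD_of_nonneg _ _ hy, PySem.List.pySetD_of_nonneg _ _ hx]
  unfold pvCellN
  by_cases hyy : y.toNat = yy
  · subst hyy
    by_cases hylen : y.toNat < g.length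
    · have hg : g[y.toNat]? = some (g[y.toNat]) := List.getElem?_eq_getElem hylen
      have hrow : PySem.List.pyGetD g y [] = g[y.toNat] :=
        PySem.List.pyGetD_eq_getElem g [] hy (by omega)
      simp only [List.getElem?_set, hylen, if_true, hrow, hg, Option.bind_some]
      by_cases hxx : x.toNat = xx
      · subst hxx
        rw [if_pos (by omega : (x.toNat : Int) = x ∧ (y.toNat : Int) = y), if_pos rfl]
        by_cases hxlen : x.toNat < g[y.toNat].length
        · rw [if_pos hxlen, List.getElem?_eq_getElem hxlen]; simp
        · rw [if_neg hxlen,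
            (by rw [List.getElem?_eq_none_iff]; omega : g[y.toNat][x.toNat]? = none)]
          simp
      · rw [if_neg hxx, if_neg (by omega : ¬((xx : Int) = x ∧ (y.toNat : Int) = y))]
    · have hnone : g[y.toNat]? = none := by rw [List.getElem?_eq_none_iff]; omega
      simp only [List.getElem?_set, hylen, if_false, hnone, Option.bind_none]
      split <;> simp
  · rw [if_neg (by omega : ¬((xx : Int) = x ∧ (yy : Int) = y))]
    simp only [List.getElem?_set, if_neg hyy]

theorem length_pvDeleteAll (L : List (Int × Int)) (g : List (List Int)) :
    (pvDeleteAll L g).length = g.length := by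
  induction L generalizing g with
  | nil => rfl
  | cons p L ih =>
    show (pvDeleteAll L _).length = _
    rw [ih, PySem.List.length_pySetD]

theorem cell_pvDeleteAll (L : List (Int × Int)) (g : List (List Int))
    (hL : ∀ p ∈ L, 0 ≤ p.1 ∧ 0 ≤ p.2) (yy xx : Nat) :
    pvCellN (pvDeleteAll L g) yy xx =
      if ((xx : Int), (yy : Int)) ∈ L then (pvCellN g yy xx).map (fun _ => 0)
      else pvCellN g yy xx := by
  induction L generalizing g with
  | nil => simp [pvDeleteAll]
  | cons p L ih =>
    have hp := hL p List.mem_cons_self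
    have hstep : pvDeleteAll (p :: L) g =
        pvDeleteAll L (PySem.List.pySetD g p.2 (PySem.List.pySetD (PySem.List.pyGetD g p.2 []) p.1 0)) := rfl
    rw [hstep, ih _ (fun q hq => hL q (List.mem_cons_of_mem _ hq)),
      cell_set0 g p.1 p.2 hp.1 hp.2]
    by_cases h1 : ((xx : Int), (yy : Int)) = p
    · have hc : (xx : Int) = p.1 ∧ (yy : Int) = p.2 := by
        rw [← h1]; exact ⟨rfl, rfl⟩
      rw [if_pos hc, if_pos (List.mem_cons.mpr (Or.inl h1))]
      by_cases h2 : ((xx : Int), (yy : Int)) ∈ L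
      · rw [if_pos h2, Option.map_map]; rfl
      · rw [if_neg h2]
    · have hc : ¬((xx : Int) = p.1 ∧ (yy : Int) = p.2) := by
        intro h; exact h1 (Prod.ext_iff.mpr h)
      rw [if_neg hc]
      by_cases h2 : ((xx : Int), (yy : Int)) ∈ L
      · rw [if_pos h2, if_pos (List.mem_cons.mpr (Or.inr h2))]
      · rw [if_neg h2, if_neg (by simp [List.mem_cons, h1, h2])]

theorem rowlen_set0 (g : List (List Int)) (x y : Int) (hx : 0 ≤ x) (hy : 0 ≤ y) (yy : Nat) :
    ((PySem.List.pySetD g y (PySem.List.pySetD (PySem.List.pyGetD g y []) x 0))[yy]?).map List.length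
      = (g[yy]?).map List.length := by
  rw [PySem.List.pySetD_of_nonneg _ _ hy, PySem.List.pySetD_of_nonneg _ _ hx]
  rw [List.getElem?_set]
  by_cases hyy : y.toNat = yy
  · subst hyy
    by_cases hylen : y.toNat < g.length
    · rw [if_pos rfl, if_pos hylen, List.getElem?_eq_getElem hylen,
        PySem.List.pyGetD_eq_getElem g [] hy (by omega)]
      simp
    · rw [if_pos rfl, if_neg hylen, List.getElem?_eq_none_iff.mpr (by omega)]
  · rw [if_neg hyy]

theorem rowlen_pvDeleteAll (L : List (Int × Int)) (g : List (List Int))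
    (hL : ∀ p ∈ L, 0 ≤ p.1 ∧ 0 ≤ p.2) (yy : Nat) :
    ((pvDeleteAll L g)[yy]?).map List.length = (g[yy]?).map List.length := by
  induction L generalizing g with
  | nil => rfl
  | cons p L ih =>
    have hp := hL p List.mem_cons_self
    show ((pvDeleteAll L _)[yy]?).map List.length = _
    rw [ih _ (fun q hq => hL q (List.mem_cons_of_mem _ hq)), rowlen_set0 g p.1 p.2 hp.1 hp.2]

theorem pvW_pvDeleteAll (L : List (Int × Int)) (g : List (List Int))
    (hL : ∀ p ∈ L, 0 ≤ p.1 ∧ 0 ≤ p.2) : pvW (pvDeleteAll L g) = pvW g := by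
  have h := rowlen_pvDeleteAll L g hL 0
  unfold pvW
  rw [PySem.List.pyGetD_zero, PySem.List.pyGetD_zero]
  cases h1 : (pvDeleteAll L g)[0]? <;> cases h2 : g[0]? <;>
    rw [h1, h2] at h <;> simp_all [List.getD]

-- two grids with the same lengths and cells are equal
theorem grid_ext (G G' : List (List Int)) (hlen : G.length = G'.length)
    (hcell : ∀ yy xx, pvCellN G yy xx = pvCellN G' yy xx) : G = G' := by
  apply List.ext_getElem?
  intro yy
  cases h1 : G[yy]? with
  | none =>
    have hge := List.getElem?_eq_none_iff.mp h1
    have h2 : G'[yy]? = none := List.getElem?_eq_none_iff.mpr (show G'.length ≤ yy by omega)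
    rw [h2]
  | some r =>
    have hlt : yy < G.length := by
      by_contra h
      rw [List.getElem?_eq_none_iff.mpr (show G.length ≤ yy by omega)] at h1; cases h1
    obtain ⟨r', h2⟩ : ∃ r', G'[yy]? = some r' := by
      cases h2 : G'[yy]? with
      | none =>
        have := List.getElem?_eq_none_iff.mp h2
        exact absurd hlt (by omega)
      | some r' => exact ⟨r', rfl⟩
    rw [h2]
    congr 1
    apply List.ext_getElem?
    intro xx
    have := hcell yy xx
    unfold pvCellN at this
    rw [h1, h2] at this
    simpa using this

theorem deleteAll_congr (L L' : List (Int × Int)) (g : List (List Int))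
    (hL : ∀ p ∈ L, 0 ≤ p.1 ∧ 0 ≤ p.2) (hL' : ∀ p ∈ L', 0 ≤ p.1 ∧ 0 ≤ p.2)
    (hmem : ∀ p, p ∈ L ↔ p ∈ L') : pvDeleteAll L g = pvDeleteAll L' g := by
  apply grid_ext
  · rw [length_pvDeleteAll, length_pvDeleteAll]
  · intro yy xx
    rw [cell_pvDeleteAll L g hL yy xx, cell_pvDeleteAll L' g hL' yy xx]
    by_cases h : ((xx : Int), (yy : Int)) ∈ L
    · rw [if_pos h, if_pos ((hmem _).mp h)]
    · rw [if_neg h, if_neg (fun hc => h ((hmem _).mpr hc))]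

theorem pvCell_natCast (g : List (List Int)) (m n : Nat) :
    pvCell g (m : Int) (n : Int) = (pvCellN g m n).getD 0 := by
  unfold pvCell pvCellN
  rw [PySem.List.pyGetD_natCast, PySem.List.pyGetD_natCast]
  by_cases hm : m < g.length
  · rw [List.getD_eq_getElem g [] hm, List.getElem?_eq_getElem hm]
    by_cases hn : n < g[m].length
    · rw [List.getD_eq_getElem _ 0 hn, Option.bind_some, List.getElem?_eq_getElem hn]; rfl
    · rw [List.getD_eq_default _ 0 (by omega), Option.bind_some,
        List.getElem?_eq_none_iff.mpr (by omega)]; rfl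
  · rw [List.getD_eq_default g [] (by omega), List.getElem?_eq_none_iff.mpr (by omega)]
    rfl

theorem pvCell_deleteAll_not_mem (L : List (Int × Int)) (g : List (List Int))
    (hL : ∀ p ∈ L, 0 ≤ p.1 ∧ 0 ≤ p.2) (x y : Int) (hx : 0 ≤ x) (hy : 0 ≤ y)
    (hnm : (x, y) ∉ L) : pvCell (pvDeleteAll L g) y x = pvCell g y x := by
  obtain ⟨m, rfl⟩ : ∃ m : Nat, y = (m : Int) := ⟨y.toNat, by omega⟩
  obtain ⟨n, rfl⟩ : ∃ n : Nat, x = (n : Int) := ⟨x.toNat, by omega⟩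
  rw [pvCell_natCast, pvCell_natCast, cell_pvDeleteAll L g hL m n, if_neg hnm]

-- pvCond only reads the 3x3 box around (x, y)
theorem pvCond_local (g g' : List (List Int)) (first : Bool) (x y : Int)
    (hc : ∀ a b : Int, x - 1 ≤ a → a ≤ x + 1 → y - 1 ≤ b → b ≤ y + 1 →
      pvCell g' b a = pvCell g b a) :
    pvCond g' first x y = pvCond g first x y := by
  have h1 := hc x (y-1) (by omega) (by omega) (by omega) (by omega)
  have h2 := hc (x+1) (y-1) (by omega) (by omega) (by omega) (by omega)
  have h3 := hc (x+1) y (by omega) (by omega) (by omega) (by omega)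
  have h4 := hc (x+1) (y+1) (by omega) (by omega) (by omega) (by omega)
  have h5 := hc x (y+1) (by omega) (by omega) (by omega) (by omega)
  have h6 := hc (x-1) (y+1) (by omega) (by omega) (by omega) (by omega)
  have h7 := hc (x-1) y (by omega) (by omega) (by omega) (by omega)
  have h8 := hc (x-1) (y-1) (by omega) (by omega) (by omega) (by omega)
  have h9 := hc x y (by omega) (by omega) (by omega) (by omega)
  unfold pvCond
  rw [h1, h2, h3, h4, h5, h6, h7, h8, h9]

-- B's early-return chain computes the same boolean as A's conjunction
theorem trans9 (a1 a2 a3 a4 a5 a6 a7 a8 : Int) :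
    pvTransitions [a1, a2, a3, a4, a5, a6, a7, a8] =
      ((([a1, a2, a3, a4, a5, a6, a7, a8, a1].zip
          ([a1, a2, a3, a4, a5, a6, a7, a8, a1]).tail).countP
            (fun p => p.1 == 0 && p.2 == 1) : Nat) : Int) := by
  simp [pvTransitions, PySem.List.slice]

theorem iteand (q1 q2 t : Int) (s : Bool) :
    (if (!(q1 == 0) || !(q2 == 0)) then false else if t ≠ 1 then false else s)
      = (q1 == 0 && (q2 == 0) && (t == 1) && s) := by
  by_cases h1 : q1 = 0 <;> by_cases h2 : q2 = 0 <;> by_cases ht : t = 1 <;>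
    simp [h1, h2, ht]

theorem condBOf (first : Bool) (v c2 c3 c4 c5 c6 c7 c8 c9 : Int) :
    (if v ≠ 1 then false
     else
       if (if first then !(c4 * c6 * c8 == 0) || !(c2 * c4 * c6 == 0)
           else !(c2 * c6 * c8 == 0) || !(c2 * c4 * c8 == 0)) then false
       else
         if (((([c2, c3, c4, c5, c6, c7, c8, c9, c2].zip
             ([c2, c3, c4, c5, c6, c7, c8, c9, c2]).tail).countP
               (fun p => p.1 == 0 && p.2 == 1) : Nat) : Int)) ≠ 1 then false
         else decide (2 ≤ c2 + c3 + c4 + c5 + c6 + c7 + c8 + c9) &&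
              decide (c2 + c3 + c4 + c5 + c6 + c7 + c8 + c9 ≤ 6))
      = pvCondOf first v c2 c3 c4 c5 c6 c7 c8 c9 := by
  unfold pvCondOf
  rw [trans9]
  by_cases hv : v = 1
  · have hsum : ([c2, c3, c4, c5, c6, c7, c8, c9] : List Int).sum
        = c2 + c3 + c4 + c5 + c6 + c7 + c8 + c9 := by
      simp [List.sum_cons]; ring
    simp only [hv, ne_eq, not_true_eq_false, if_false, beq_self_eq_true,
      Bool.true_and, hsum]
    cases first <;> simp only [Bool.false_eq_true, if_false, if_true] <;>
      exact iteand _ _ _ _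
  · have hvb : (v == 1) = false := by simp [hv]
    simp [hv, hvb]

theorem condB_eq (g : List (List Int)) (first : Bool) (x y : Int) :
    pvCondB g x y first = pvCond g first x y := by
  simp only [pvCondB, pvCond]
  exact condBOf first (pvCell g y x) (pvCell g (y-1) x) (pvCell g (y-1) (x+1))
    (pvCell g y (x+1)) (pvCell g (y+1) (x+1)) (pvCell g (y+1) x) (pvCell g (y+1) (x-1))
    (pvCell g y (x-1)) (pvCell g (y-1) (x-1))

theorem pvW_eq (g : List (List Int)) :
    (if g = [] then (0 : Int) else ((g.headD []).length : Int)) = pvW g := by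
  cases g <;> simp [pvW, PySem.List.pyGetD_zero]

theorem mem_pvNbhdC (h w : Int) (pts : List (Int × Int)) (q : Int × Int) :
    q ∈ pvNbhdC h w pts ↔
      ((∃ p ∈ pts, p.1 - 1 ≤ q.1 ∧ q.1 ≤ p.1 + 1 ∧ p.2 - 1 ≤ q.2 ∧ q.2 ≤ p.2 + 1) ∧
       pvIn h w q) := by
  unfold pvNbhdC pvIn
  rw [PySem.Set.mem_ofList]
  simp only [List.mem_flatMap, List.mem_map, List.mem_filter, Bool.and_eq_true,
    decide_eq_true_eq]
  constructor
  · rintro ⟨p, hp, dx, hdx, dy, ⟨hdy, hb⟩, rfl⟩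
    have hdx' : dx = -1 ∨ dx = 0 ∨ dx = 1 := by simpa using hdx
    have hdy' : dy = -1 ∨ dy = 0 ∨ dy = 1 := by simpa using hdy
    obtain ⟨⟨⟨c1, c2⟩, c3⟩, c4⟩ := hb
    exact ⟨⟨p, hp, by omega, by omega, by omega, by omega⟩, by omega, by omega, by omega, by omega⟩
  · rintro ⟨⟨p, hp, h1, h2, h3, h4⟩, hq1, hq2, hq3, hq4⟩
    refine ⟨p, hp, q.1 - p.1, by simpa using by omega, q.2 - p.2,
      ⟨by simpa using by omega, ⟨⟨by omega, by omega⟩, by omega⟩, by omega⟩, by simp⟩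

theorem mem_pvScan (g : List (List Int)) (h w : Int) (first : Bool) (x y : Int) :
    (x, y) ∈ pvScan g h w first ↔ (pvIn h w (x, y) ∧ pvCond g first x y = true) := by
  unfold pvScan pvIn
  rw [PySem.Set.mem_ofList]
  simp only [List.mem_flatMap, List.mem_filter, List.mem_map, PySem.List.mem_pyRange_one,
    Prod.mk.injEq, condB_eq]
  constructor
  · rintro ⟨b, ⟨hb1, hb2⟩, a, ⟨⟨ha1, ha2⟩, hc⟩, h1, h2⟩
    subst h1; subst h2; exact ⟨⟨ha1, ha2, hb1, hb2⟩, hc⟩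
  · rintro ⟨⟨h3, h4, h1, h2⟩, h5⟩
    exact ⟨y, ⟨h1, h2⟩, x, ⟨⟨h3, h4⟩, h5⟩, rfl, rfl⟩

theorem pvLoopB_succ (h w : Int) (f : Nat) (image : List (List Int))
    (cand1 cand2 : Option (PySem.Set (Int × Int))) :
    pvLoopB h w (f + 1) image cand1 cand2 =
      (let d1 := match cand1 with
        | none => pvScan image h w true
        | some c => c.filter (fun p => pvCondB image p.1 p.2 true)
       let n1 := pvNbhdC h w d1
       let d2 := match cand2 with
        | none => pvScan (pvDeleteAll d1 image) h w false
        | some c => (PySem.Set.union c n1).filter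
            (fun p => pvCondB (pvDeleteAll d1 image) p.1 p.2 false)
       let n2 := pvNbhdC h w d2
       if d1 = [] ∧ d2 = [] then pvDeleteAll d2 (pvDeleteAll d1 image)
       else pvLoopB h w f (pvDeleteAll d2 (pvDeleteAll d1 image))
         (some (PySem.Set.union n1 n2)) (some n2)) := rfl

-- the main loop correspondence: under the worklist invariant the two loops compute the same grid
theorem loopAB (h w : Int) (fuel : Nat) :
    ∀ (g : List (List Int)) (C1? C2? : Option (PySem.Set (Int × Int))),
      (g.length : Int) = h → pvW g = w →
      (∀ C, C1? = some C → (∀ p ∈ C, pvIn h w p) ∧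
        (∀ x y, pvIn h w (x, y) → (x, y) ∉ C → pvCond g true x y = false)) →
      (∀ C, C2? = some C → (∀ p ∈ C, pvIn h w p) ∧
        (∀ x y, pvIn h w (x, y) → (x, y) ∉ C → pvCond g false x y = false)) →
      pvLoopA fuel g = pvLoopB h w fuel g C1? C2? := by
  induction fuel with
  | zero => intro g C1? C2? _ _ _ _; rfl
  | succ f ih =>
    intro g C1? C2? hH hW hC1 hC2
    set d1 := (match C1? with
      | none => pvScan g h w true
      | some c => c.filter (fun p => pvCondB g p.1 p.2 true)) with hd1
    have hnnS1 : ∀ p ∈ pvStep1 g, 0 ≤ p.1 ∧ 0 ≤ p.2 := by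
      rintro ⟨x, y⟩ hp
      have := (mem_step1 g x y).mp hp
      unfold pvIn at this
      exact ⟨by omega, by omega⟩
    -- F1: d1 has the same members as pvStep1 g
    have hF1 : ∀ p, p ∈ d1 ↔ p ∈ pvStep1 g := by
      rintro ⟨x, y⟩
      rcases hc : C1? with _ | C
      · rw [hd1, hc]
        show (x, y) ∈ pvScan g h w true ↔ _
        rw [mem_pvScan, mem_step1, hH, hW]
      · obtain ⟨hSub, hInv⟩ := hC1 C hc
        rw [hd1, hc]
        show (x, y) ∈ C.filter (fun p => pvCondB g p.1 p.2 true) ↔ _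
        rw [List.mem_filter, mem_step1, hH, hW]
        constructor
        · rintro ⟨hmem, hcond⟩
          rw [condB_eq] at hcond
          exact ⟨hSub _ hmem, hcond⟩
        · rintro ⟨hin, hcond⟩
          refine ⟨?_, by rw [condB_eq]; exact hcond⟩
          by_contra hnm
          rw [hInv x y hin hnm] at hcond
          cases hcond
    have hnn1 : ∀ p ∈ d1, 0 ≤ p.1 ∧ 0 ≤ p.2 :=
      fun p hp => hnnS1 p ((hF1 p).mp hp)
    -- F2: the two deletions give the same grid
    have hF2 : pvDeleteAll d1 g = pvDeleteAll (pvStep1 g) g :=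
      deleteAll_congr _ _ g hnn1 hnnS1 hF1
    set g1 := pvDeleteAll (pvStep1 g) g with hg1
    have hg1H : ((g1.length : Int)) = h := by rw [hg1, length_pvDeleteAll]; exact hH
    have hg1W : pvW g1 = w := by rw [hg1, pvW_pvDeleteAll _ _ hnnS1]; exact hW
    set n1 := pvNbhdC h w d1 with hn1
    have hmem_n1 : ∀ q, q ∈ n1 ↔ ((∃ p ∈ pvStep1 g,
        p.1 - 1 ≤ q.1 ∧ q.1 ≤ p.1 + 1 ∧ p.2 - 1 ≤ q.2 ∧ q.2 ≤ p.2 + 1) ∧ pvIn h w q) := by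
      intro q
      rw [hn1, mem_pvNbhdC]
      constructor
      · rintro ⟨⟨p, hp, hb⟩, hq⟩; exact ⟨⟨p, (hF1 p).mp hp, hb⟩, hq⟩
      · rintro ⟨⟨p, hp, hb⟩, hq⟩; exact ⟨⟨p, (hF1 p).mpr hp, hb⟩, hq⟩
    -- locality: a pixel whose 3x3 box avoids the step-1 deletions keeps its condition
    have hloc1 : ∀ x y first, pvIn h w (x, y) → (x, y) ∉ n1 →
        pvCond g1 first x y = pvCond g first x y := by
      intro x y first hin hn
      apply pvCond_local
      intro a b ha1 ha2 hb1 hb2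
      have hin' := hin; unfold pvIn at hin'
      apply pvCell_deleteAll_not_mem _ _ hnnS1 _ _ (by omega) (by omega)
      intro habs
      exact hn ((hmem_n1 (x, y)).mpr ⟨⟨(a, b), habs, by omega, by omega, by omega, by omega⟩, hin⟩)
    set d2 := (match C2? with
      | none => pvScan (pvDeleteAll d1 g) h w false
      | some c => (PySem.Set.union c n1).filter
          (fun p => pvCondB (pvDeleteAll d1 g) p.1 p.2 false)) with hd2
    have hnnS2 : ∀ p ∈ pvStep2 g1, 0 ≤ p.1 ∧ 0 ≤ p.2 := by
      rintro ⟨x, y⟩ hp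
      have := (mem_step2 g1 x y).mp hp
      unfold pvIn at this
      exact ⟨by omega, by omega⟩
    -- F5: d2 has the same members as pvStep2 g1
    have hF5 : ∀ p, p ∈ d2 ↔ p ∈ pvStep2 g1 := by
      rintro ⟨x, y⟩
      rcases hc : C2? with _ | C
      · rw [hd2, hc]
        show (x, y) ∈ pvScan (pvDeleteAll d1 g) h w false ↔ _
        rw [hF2, mem_pvScan, mem_step2, hg1H, hg1W]
      · obtain ⟨hSub, hInv⟩ := hC2 C hc
        rw [hd2, hc]
        show (x, y) ∈ (PySem.Set.union C n1).filter
          (fun p => pvCondB (pvDeleteAll d1 g) p.1 p.2 false) ↔ _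
        rw [hF2, List.mem_filter, mem_step2, hg1H, hg1W]
        constructor
        · rintro ⟨hmem, hcond⟩
          rw [condB_eq] at hcond
          rcases (PySem.Set.mem_union _ _ _).mp hmem with hm | hm
          · exact ⟨hSub _ hm, hcond⟩
          · exact ⟨((hmem_n1 _).mp hm).2, hcond⟩
        · rintro ⟨hin, hcond⟩
          refine ⟨?_, by rw [condB_eq]; exact hcond⟩
          by_contra hnm
          have hmC : (x, y) ∉ C := fun hm => hnm ((PySem.Set.mem_union _ _ _).mpr (Or.inl hm))
          have hmn1 : (x, y) ∉ n1 := fun hm => hnm ((PySem.Set.mem_union _ _ _).mpr (Or.inr hm))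
          rw [hloc1 x y false hin hmn1, hInv x y hin hmC] at hcond
          cases hcond
    have hnn2 : ∀ p ∈ d2, 0 ≤ p.1 ∧ 0 ≤ p.2 :=
      fun p hp => hnnS2 p ((hF5 p).mp hp)
    have hF6 : pvDeleteAll d2 g1 = pvDeleteAll (pvStep2 g1) g1 :=
      deleteAll_congr _ _ g1 hnn2 hnnS2 hF5
    set g2 := pvDeleteAll (pvStep2 g1) g1 with hg2
    have hg2H : ((g2.length : Int)) = h := by rw [hg2, length_pvDeleteAll]; exact hg1H
    have hg2W : pvW g2 = w := by rw [hg2, pvW_pvDeleteAll _ _ hnnS2]; exact hg1W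
    set n2 := pvNbhdC h w d2 with hn2
    have hmem_n2 : ∀ q, q ∈ n2 ↔ ((∃ p ∈ pvStep2 g1,
        p.1 - 1 ≤ q.1 ∧ q.1 ≤ p.1 + 1 ∧ p.2 - 1 ≤ q.2 ∧ q.2 ≤ p.2 + 1) ∧ pvIn h w q) := by
      intro q
      rw [hn2, mem_pvNbhdC]
      constructor
      · rintro ⟨⟨p, hp, hb⟩, hq⟩; exact ⟨⟨p, (hF5 p).mp hp, hb⟩, hq⟩
      · rintro ⟨⟨p, hp, hb⟩, hq⟩; exact ⟨⟨p, (hF5 p).mpr hp, hb⟩, hq⟩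
    have hloc2 : ∀ x y first, pvIn h w (x, y) → (x, y) ∉ n2 →
        pvCond g2 first x y = pvCond g1 first x y := by
      intro x y first hin hn
      apply pvCond_local
      intro a b ha1 ha2 hb1 hb2
      have hin' := hin; unfold pvIn at hin'
      apply pvCell_deleteAll_not_mem _ _ hnnS2 _ _ (by omega) (by omega)
      intro habs
      exact hn ((hmem_n2 (x, y)).mpr ⟨⟨(a, b), habs, by omega, by omega, by omega, by omega⟩, hin⟩)
    -- stop conditions agree
    have hstop1 : d1 = [] ↔ pvStep1 g = [] := by
      rw [List.eq_nil_iff_forall_not_mem, List.eq_nil_iff_forall_not_mem]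
      exact ⟨fun hA p hp => hA p ((hF1 p).mpr hp), fun hA p hp => hA p ((hF1 p).mp hp)⟩
    have hstop2 : d2 = [] ↔ pvStep2 g1 = [] := by
      rw [List.eq_nil_iff_forall_not_mem, List.eq_nil_iff_forall_not_mem]
      exact ⟨fun hA p hp => hA p ((hF5 p).mpr hp), fun hA p hp => hA p ((hF5 p).mp hp)⟩
    -- invariants for the next iteration: a deleted pixel lies in its own (clipped) neighbourhood,
    -- so outside n1 ∪ n2 nothing was deleted and nothing can newly satisfy the condition
    have hI1'' : ∀ x y, pvIn h w (x, y) → (x, y) ∉ PySem.Set.union n1 n2 →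
        pvCond g2 true x y = false := by
      intro x y hin hnm
      have hn1' : (x, y) ∉ n1 := fun hc => hnm ((PySem.Set.mem_union _ _ _).mpr (Or.inl hc))
      have hn2' : (x, y) ∉ n2 := fun hc => hnm ((PySem.Set.mem_union _ _ _).mpr (Or.inr hc))
      rw [hloc2 x y true hin hn2', hloc1 x y true hin hn1']
      by_contra hcb
      have hmem : (x, y) ∈ pvStep1 g := (mem_step1 g x y).mpr
        ⟨by rw [hH, hW]; exact hin, by simpa using hcb⟩
      exact hn1' ((hmem_n1 (x, y)).mpr
        ⟨⟨(x, y), hmem, by omega, by omega, by omega, by omega⟩, hin⟩)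
    have hI2'' : ∀ x y, pvIn h w (x, y) → (x, y) ∉ n2 → pvCond g2 false x y = false := by
      intro x y hin hnm
      rw [hloc2 x y false hin hnm]
      by_contra hcb
      have hmem : (x, y) ∈ pvStep2 g1 := (mem_step2 g1 x y).mpr
        ⟨by rw [hg1H, hg1W]; exact hin, by simpa using hcb⟩
      exact hnm ((hmem_n2 (x, y)).mpr
        ⟨⟨(x, y), hmem, by omega, by omega, by omega, by omega⟩, hin⟩)
    have hSn1 : ∀ p ∈ PySem.Set.union n1 n2, pvIn h w p := by
      intro p hp
      rcases (PySem.Set.mem_union _ _ _).mp hp with hp | hp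
      · exact ((hmem_n1 p).mp hp).2
      · exact ((hmem_n2 p).mp hp).2
    have hSn2 : ∀ p ∈ n2, pvIn h w p := fun p hp => ((hmem_n2 p).mp hp).2
    -- unfold one step of both loops
    show (if pvStep1 g = [] ∧ pvStep2 g1 = [] then g2 else pvLoopA f g2) = _
    rw [pvLoopB_succ]
    simp only [← hd1, ← hn1]
    simp only [← hd2]
    simp only [← hn2]
    rw [hF2, hF6]
    by_cases hstop : pvStep1 g = [] ∧ pvStep2 g1 = []
    · rw [if_pos hstop, if_pos ⟨hstop1.mpr hstop.1, hstop2.mpr hstop.2⟩]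
    · rw [if_neg hstop, if_neg (fun hc => hstop ⟨hstop1.mp hc.1, hstop2.mp hc.2⟩)]
      exact ih g2 (some (PySem.Set.union n1 n2)) (some n2) hg2H hg2W
        (by rintro C ⟨rfl⟩; exact ⟨hSn1, hI1''⟩)
        (by rintro C ⟨rfl⟩; exact ⟨hSn2, hI2''⟩)

-- ===== VERDICT (by name: the statement is the Claim_ definition above) =====
theorem Two_steps_spec : Claim_equal_Two_steps := by
  intro image _ _
  unfold Spec_Two_steps Two_steps Two_steps_alt
  simp only [pvW_eq]
  exact loopAB (image.length : Int) (pvW image) (pvOnes image + 1) image none none rfl rfl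
    (fun C hC => nomatch hC) (fun C hC => nomatch hC)
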